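-- pv_equiv track=rewrite | github.com/phorkyas-tg/advent-of-code | aoc2022/day24.py | stepHurricanes
-- ===== SOURCE A (Python) =====
-- def stepHurricanes(board):
--     newBoard = dict()
--
--     maxX = max([pos[0] for pos in board.keys()])
--     maxY = max([pos[1] for pos in board.keys()])
--
--     for pos, items in board.items():
--         for item in items:
--             if item == "#":
--                 newPos = pos
--             elif item == ">":
--                 if pos[0] + 1 == maxX:
--                     newPos = (1, pos[1])
--                 else:
--                     newPos = (pos[0] + 1, pos[1])
--             elif item == "<":
--                 if pos[0] - 1 == 0:
--                     newPos = (maxX - 1, pos[1])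
--                 else:
--                     newPos = (pos[0] - 1, pos[1])
--             elif item == "v":
--                 if pos[1] + 1 == maxY:
--                     newPos = (pos[0], 1)
--                 else:
--                     newPos = (pos[0], pos[1] + 1)
--             elif item == "^":
--                 if pos[1] - 1 == 0:
--                     newPos = (pos[0], maxY - 1)
--                 else:
--                     newPos = (pos[0], pos[1] - 1)
--             else:
--                 raise NotImplementedError()
--
--             newBoard.setdefault(newPos, [])
--             newBoard[newPos].append(item)
--     return newBoard
-- ===== SOURCE B (Python) =====
-- def stepHurricanes(board):
--     maxX = max(x for x, _ in board)
--     maxY = max(y for _, y in board)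
--
--     def dest(pos, item):
--         x, y = pos
--         if item == "#":
--             return pos
--         if item == ">":
--             return (1 if x + 1 == maxX else x + 1, y)
--         if item == "<":
--             return (maxX - 1 if x - 1 == 0 else x - 1, y)
--         if item == "v":
--             return (x, 1 if y + 1 == maxY else y + 1)
--         if item == "^":
--             return (x, maxY - 1 if y - 1 == 0 else y - 1)
--         raise NotImplementedError()
--
--     # Stage 1: flatten the board into a list of (destination, item) moves.
--     moves = [(dest(pos, it), it) for pos, items in board.items() for it in items]
--
--     # Stage 2: partition the move list cell by cell: repeatedly take the first
--     # remaining destination, collect all of its items, and drop them from the list.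
--     newBoard = {}
--     while moves:
--         d = moves[0][0]
--         newBoard[d] = [it for e, it in moves if e == d]
--         moves = [m for m in moves if m[0] != d]
--     return newBoard
-- ===== Notes on version B (the rewrite author's own statement) =====
-- stated objective: alternative
-- what changed: B is staged: it first flattens the board into a flat list of (destination, item) moves, then builds the new board by repeated partitioning of that list (take the first remaining destination, collect all its items with a filter, drop them and repeat), instead of A's single pass that mutates a dict with setdefault/append per item.
-- outside the precondition, e.g. on stepHurricanes({}): A raises ValueError, B raises ValueError; on stepHurricanes({(1, 1): ['x']}): A raises NotImplementedError, B raises NotImplementedError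
import Mathlib
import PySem

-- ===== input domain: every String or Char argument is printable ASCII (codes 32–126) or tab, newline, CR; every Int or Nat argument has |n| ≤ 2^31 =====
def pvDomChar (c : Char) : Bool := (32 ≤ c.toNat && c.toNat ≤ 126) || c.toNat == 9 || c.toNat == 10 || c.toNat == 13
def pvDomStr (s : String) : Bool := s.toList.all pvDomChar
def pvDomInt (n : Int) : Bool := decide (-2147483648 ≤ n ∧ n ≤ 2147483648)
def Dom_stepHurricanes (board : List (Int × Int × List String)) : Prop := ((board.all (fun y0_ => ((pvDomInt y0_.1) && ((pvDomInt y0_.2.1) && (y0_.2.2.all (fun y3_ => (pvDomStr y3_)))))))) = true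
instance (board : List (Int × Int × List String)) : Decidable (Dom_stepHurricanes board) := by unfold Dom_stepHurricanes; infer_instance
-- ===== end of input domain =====

-- B stages the work: flatten the board into a flat (destination, item) move list, then build the
-- new board by repeated partitioning of that list, instead of A's per-item setdefault/append dict
-- mutation; objective: alternative (same cost up to the number of distinct cells).

-- ===== PORT A =====
-- the branch chain of A's loop body computing newPos (verbatim, factored as a helper)
def pvNewPosA (maxX maxY : Int) (pos : Int × Int) (item : String) : Int × Int :=
  if item = "#" then pos
  else if item = ">" then (if pos.1 + 1 = maxX then ((1 : Int), pos.2) else (pos.1 + 1, pos.2))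
  else if item = "<" then (if pos.1 - 1 = 0 then (maxX - 1, pos.2) else (pos.1 - 1, pos.2))
  else if item = "v" then (if pos.2 + 1 = maxY then (pos.1, (1 : Int)) else (pos.1, pos.2 + 1))
  else if item = "^" then (if pos.2 - 1 = 0 then (pos.1, maxY - 1) else (pos.1, pos.2 - 1))
  else pos  -- Python: raise NotImplementedError — excluded by Pre_

def stepHurricanes (board : List (Int × Int × List String)) : List (Int × Int × List String) :=
  match PySem.List.max? (board.map (fun pos => pos.1)) (fun x => x),
        PySem.List.max? (board.map (fun pos => pos.2.1)) (fun y => y) with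
  | some maxX, some maxY =>
    -- for pos, items in board.items(): for item in items: … setdefault/append
    let newBoard := board.foldl (fun d e =>
      e.2.2.foldl (fun d item =>
        d.modify (pvNewPosA maxX maxY (e.1, e.2.1) item) [] (· ++ [item])) d)
      (PySem.Dict.empty : PySem.Dict (Int × Int) (List String))
    newBoard.items.map (fun p => (p.1.1, p.1.2, p.2))
  | _, _ => []  -- Python: max([…]) on an empty board raises ValueError — excluded by Pre_

-- ===== PORT B =====
-- Source B's dest(pos, item) (conditional-expression form; unknown items raise — excluded by Pre_)
def pvDestB (maxX maxY : Int) (pos : Int × Int) (item : String) : Int × Int :=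
  if item = "#" then pos
  else if item = ">" then ((if pos.1 + 1 = maxX then (1 : Int) else pos.1 + 1), pos.2)
  else if item = "<" then ((if pos.1 - 1 = 0 then maxX - 1 else pos.1 - 1), pos.2)
  else if item = "v" then (pos.1, (if pos.2 + 1 = maxY then (1 : Int) else pos.2 + 1))
  else if item = "^" then (pos.1, (if pos.2 - 1 = 0 then maxY - 1 else pos.2 - 1))
  else pos

-- Source B's while-loop: take the first remaining destination, collect its items, drop them, repeat
def pvGroup (ms : List ((Int × Int) × String)) : List ((Int × Int) × List String) :=
  match ms with
  | [] => []
  | m :: rest =>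
    (m.1, ((m :: rest).filter (fun p => p.1 == m.1)).map (fun p => p.2)) ::
      pvGroup ((m :: rest).filter (fun p => p.1 != m.1))
termination_by ms.length
decreasing_by
  simp only [List.filter_cons, bne_self_eq_false, Bool.false_eq_true, if_false,
    List.length_cons]
  exact Nat.lt_succ_of_le (List.length_filter_le _ _)

def stepHurricanes_alt (board : List (Int × Int × List String)) : List (Int × Int × List String) :=
  match PySem.List.max? (board.map (fun pos => pos.1)) (fun x => x) with
  | none => []  -- max() on an empty board raises ValueError — excluded by Pre_
  | some maxX =>
    match PySem.List.max? (board.map (fun pos => pos.2.1)) (fun y => y) with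
    | none => []
    | some maxY =>
      let moves := board.flatMap (fun e =>
        e.2.2.map (fun item => (pvDestB maxX maxY (e.1, e.2.1) item, item)))
      (pvGroup moves).map (fun p => (p.1.1, p.1.2, p.2))

-- ===== PRECONDITION & SPEC =====
-- A raises ValueError on an empty board and NotImplementedError on any item other than the five
-- blizzard/wall characters; the input list stands for a Python dict, so its keys must be distinct.
def Pre_stepHurricanes (board : List (Int × Int × List String)) : Prop :=
  board ≠ [] ∧ (board.map (fun e => (e.1, e.2.1))).Nodup ∧
    ∀ e ∈ board, ∀ item ∈ e.2.2, item ∈ ["#", ">", "<", "v", "^"]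
instance (board : List (Int × Int × List String)) : Decidable (Pre_stepHurricanes board) := by
  unfold Pre_stepHurricanes; infer_instance

def pvWitness_stepHurricanes : (List (Int × Int × List String)) :=
  [(1, 1, [">", "v"]), (2, 1, ["#"]), (2, 2, ["<", "^"])]

def Spec_stepHurricanes (board : List (Int × Int × List String)) (out : List (Int × Int × List String)) : Prop := out = stepHurricanes_alt board
instance (board : List (Int × Int × List String)) (out : List (Int × Int × List String)) : Decidable (Spec_stepHurricanes board out) := by unfold Spec_stepHurricanes; infer_instance

-- ===== CLAIM (what is proved, stated in full; the proofs are below) =====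
def Claim_equal_stepHurricanes : Prop := ∀ (board : List (Int × Int × List String)), Dom_stepHurricanes board → Pre_stepHurricanes board → Spec_stepHurricanes board (stepHurricanes board)

-- ===== LEMMAS AND PROOFS =====

-- on the five admitted items the two ports' move rules agree
lemma newPosA_eq_destB (maxX maxY : Int) (pos : Int × Int) (item : String)
    (h : item ∈ ["#", ">", "<", "v", "^"]) :
    pvNewPosA maxX maxY pos item = pvDestB maxX maxY pos item := by
  simp only [List.mem_cons, List.not_mem_nil, or_false] at h
  rcases h with h | h | h | h | h <;> subst h <;>
    simp [pvNewPosA, pvDestB] <;> split_ifs <;> rfl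

-- A's inner loop over one cell's items is the fold over that cell's move list
lemma inner_eq (maxX maxY x y : Int) (items : List String)
    (h : ∀ item ∈ items, item ∈ ["#", ">", "<", "v", "^"])
    (d : PySem.Dict (Int × Int) (List String)) :
    items.foldl (fun d item =>
        d.modify (pvNewPosA maxX maxY (x, y) item) [] (· ++ [item])) d
      = (items.map (fun item => (pvDestB maxX maxY (x, y) item, item))).foldl
          (fun d m => d.modify m.1 [] (· ++ [m.2])) d := by
  induction items generalizing d with
  | nil => rfl
  | cons it tl ih =>
    simp only [List.foldl_cons, List.map_cons]
    rw [newPosA_eq_destB maxX maxY (x, y) it (h it (List.mem_cons_self ..))]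
    exact ih (fun i hi => h i (List.mem_cons_of_mem _ hi)) _

-- A's nested loops over the board are the flat fold over B's move list
lemma outer_eq (maxX maxY : Int) (board : List (Int × Int × List String))
    (h : ∀ e ∈ board, ∀ item ∈ e.2.2, item ∈ ["#", ">", "<", "v", "^"])
    (d : PySem.Dict (Int × Int) (List String)) :
    board.foldl (fun d e =>
        e.2.2.foldl (fun d item =>
          d.modify (pvNewPosA maxX maxY (e.1, e.2.1) item) [] (· ++ [item])) d) d
      = (board.flatMap (fun e =>
          e.2.2.map (fun item => (pvDestB maxX maxY (e.1, e.2.1) item, item)))).foldl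
          (fun d m => d.modify m.1 [] (· ++ [m.2])) d := by
  induction board generalizing d with
  | nil => rfl
  | cons e tl ih =>
    simp only [List.foldl_cons, List.flatMap_cons, List.foldl_append]
    rw [inner_eq maxX maxY e.1 e.2.1 e.2.2 (h e (List.mem_cons_self ..))]
    exact ih (fun e2 he2 => h e2 (List.mem_cons_of_mem _ he2)) _

-- deduplication commutes with filtering
lemma ofList_filter {α : Type} [BEq α] [LawfulBEq α] (p : α → Bool) (l : List α) :
    PySem.Set.ofList (l.filter p) = (PySem.Set.ofList l).filter p := by
  induction l with
  | nil => rfl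
  | cons x xs ih =>
    by_cases hp : p x = true
    · rw [List.filter_cons_of_pos hp, PySem.Set.ofList_cons, PySem.Set.ofList_cons,
        PySem.Set.discard, PySem.Set.discard, List.filter_cons_of_pos hp, ih,
        List.filter_comm]
    · rw [List.filter_cons_of_neg (by simp_all), PySem.Set.ofList_cons, PySem.Set.discard,
        List.filter_cons_of_neg (by simp_all), ih, List.filter_comm]
      symm
      apply List.filter_eq_self.2
      intro y hy
      rcases List.mem_filter.1 hy with ⟨-, hyp⟩
      have hne : y ≠ x := fun hyx => hp (hyx ▸ hyp)
      simp [hne]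

-- projecting keys out of a key-filtered move list filters the projected keys
lemma map_fst_filter_ne (k : Int × Int) (l : List ((Int × Int) × String)) :
    (l.filter (fun p => p.1 != k)).map (fun p => p.1)
      = (l.map (fun p => p.1)).filter (fun q => q != k) := by
  induction l with
  | nil => rfl
  | cons a t iht =>
    simp only [List.map_cons, List.filter_cons]
    cases h : (a.1 != k) <;> simp [iht]
-- Source B's partition loop produces, for each first-occurrence destination, its filtered item list
lemma pvGroup_eq (ms : List ((Int × Int) × String)) :
    pvGroup ms = (PySem.Set.ofList (ms.map (fun p => p.1))).map
      (fun k => (k, (ms.filter (fun p => p.1 == k)).map (fun p => p.2))) := by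
  induction hn : ms.length using Nat.strong_induction_on generalizing ms with
  | _ n ih =>
  match ms with
  | [] => simp [pvGroup]
  | m :: rest =>
    rw [pvGroup]
    have hhead : (m :: rest).filter (fun p => p.1 != m.1) = rest.filter (fun p => p.1 != m.1) := by
      simp
    have hlen : (rest.filter (fun p => p.1 != m.1)).length < n := by
      subst hn
      exact Nat.lt_succ_of_le (List.length_filter_le _ _)
    rw [hhead, ih _ hlen _ rfl, map_fst_filter_ne, ofList_filter]
    rw [List.map_cons, PySem.Set.ofList_cons, List.map_cons, PySem.Set.discard]
    congr 1
    apply List.map_congr_left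
    intro k hk
    rcases List.mem_filter.1 hk with ⟨-, hkne⟩
    have hkm : k ≠ m.1 := by simpa using hkne
    have hmk : ¬ ((fun p : (Int × Int) × String => p.1 == k) m = true) := by
      simp [Ne.symm hkm]
    have hr : List.filter (fun p : (Int × Int) × String => p.1 == k) (m :: rest)
        = List.filter (fun p => p.1 == k) rest := List.filter_cons_of_neg hmk
    congr 1
    rw [hr, List.filter_filter]
    congr 1
    apply List.filter_congr
    intro p _
    by_cases hp : p.1 = k
    · simp [hp, hkm]
    · simp [hp]

-- the dict A folds up has the same canonical grouped form
lemma dict_items_eq (ms : List ((Int × Int) × String)) :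
    (ms.foldl (fun d m => d.modify m.1 [] (· ++ [m.2]))
        (PySem.Dict.empty : PySem.Dict (Int × Int) (List String))).items
      = (PySem.Set.ofList (ms.map (fun p => p.1))).map
          (fun k => (k, (ms.filter (fun p => p.1 == k)).map (fun p => p.2))) := by
  set D := ms.foldl (fun d m => d.modify m.1 [] (· ++ [m.2]))
    (PySem.Dict.empty : PySem.Dict (Int × Int) (List String)) with hD
  have hkeys : D.keys = PySem.Set.ofList (ms.map (fun p => p.1)) := by
    rw [hD, PySem.Dict.keys_foldl_modify_key, PySem.Dict.keys_empty,
      PySem.Set.update_nil_left]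
  have hnodup : D.keys.Nodup := by
    rw [hkeys]; exact PySem.Set.nodup_ofList _
  rw [PySem.Dict.items_eq_map_keys D hnodup [], hkeys]
  apply List.map_congr_left
  intro k _
  congr 1
  rw [hD, PySem.Dict.getD_foldl_modify_append, PySem.Dict.getD_empty, List.nil_append]

-- ===== VERDICT (by name: the statement is the Claim_ definition above) =====
theorem stepHurricanes_spec : Claim_equal_stepHurricanes := by
  intro board _ hpre
  unfold Spec_stepHurricanes stepHurricanes stepHurricanes_alt
  rcases hpre with ⟨-, -, hitems⟩
  cases hx : PySem.List.max? (board.map (fun pos => pos.1)) (fun x => x) with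
  | none => rfl
  | some maxX =>
    cases hy : PySem.List.max? (board.map (fun pos => pos.2.1)) (fun y => y) with
    | none => rfl
    | some maxY =>
      simp only []
      rw [outer_eq maxX maxY board hitems, dict_items_eq, pvGroup_eq]
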